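-- pv_equiv track=rewrite | github.com/Ritvik2205/speculative_execution | scripts/train_bilstm_v23_hybrid.py | extract_handcrafted_features
-- ===== SOURCE A (Python) =====
-- from typing import List, Dict, Tuple
--
-- def extract_handcrafted_features(seq: List[str]) -> Dict[str, float]:
--     """
--     Extract key handcrafted features from sequence.
--     Simplified version of extract_features_enhanced for speed.
--     """
--     feats = {}
--     seq_lower = [s.lower() for s in seq]
--     seq_text = ' '.join(seq_lower)
--
--     # Basic counts
--     feats['num_instructions'] = len(seq)
--
--     # Memory operations
--     feats['num_loads'] = sum(1 for s in seq_lower if any(x in s for x in ['ldr', 'mov', 'ld']))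
--     feats['num_stores'] = sum(1 for s in seq_lower if any(x in s for x in ['str', 'st', 'push']))
--
--     # Control flow
--     feats['num_branches'] = sum(1 for s in seq_lower if any(x in s for x in ['j', 'b.', 'br', 'jmp', 'je', 'jne', 'jz', 'jnz']))
--     feats['num_calls'] = sum(1 for s in seq_lower if any(x in s for x in ['call', 'bl ']))
--     feats['num_rets'] = sum(1 for s in seq_lower if 'ret' in s)
--
--     # Barriers/fences
--     feats['num_fences'] = sum(1 for s in seq_lower if any(x in s for x in ['lfence', 'mfence', 'sfence', 'dsb', 'dmb', 'isb']))
--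
--     # Spectre-related
--     feats['has_compare_before_branch'] = 0
--     for i, s in enumerate(seq_lower[:-1]):
--         if any(x in s for x in ['cmp', 'test', 'tst']):
--             if any(x in seq_lower[i+1] for x in ['j', 'b.']):
--                 feats['has_compare_before_branch'] = 1
--                 break
--
--     # Memory access after branch (Spectre V1 pattern)
--     feats['mem_after_branch'] = 0
--     for i, s in enumerate(seq_lower[:-1]):
--         if any(x in s for x in ['j', 'b.']):
--             for j in range(i+1, min(i+5, len(seq_lower))):
--                 if any(x in seq_lower[j] for x in ['ldr', 'mov', '[', 'ld']):
--                     feats['mem_after_branch'] = 1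
--                     break
--
--     # Indirect branches (Spectre V2, RETBLEED)
--     feats['has_indirect_branch'] = 1 if any(x in seq_text for x in ['jmp *', 'call *', 'br x', 'blr x', 'ret']) else 0
--
--     # Cache operations (L1TF, MDS)
--     feats['has_cache_op'] = 1 if any(x in seq_text for x in ['clflush', 'clflushopt', 'dc civac', 'dc cvac']) else 0
--
--     # Timing (side channel)
--     feats['has_timing'] = 1 if any(x in seq_text for x in ['rdtsc', 'rdtscp', 'cntvct']) else 0
--
--     # Stack operations
--     feats['stack_ops'] = sum(1 for s in seq_lower if any(x in s for x in ['push', 'pop', 'sp,', 'sp]', 'rbp', 'x29']))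
--
--     # Arithmetic chains
--     feats['arith_ops'] = sum(1 for s in seq_lower if any(x in s for x in ['add', 'sub', 'mul', 'div', 'and', 'or', 'xor', 'shl', 'shr']))
--
--     # Pattern: call followed by ret (RETBLEED)
--     feats['call_ret_pattern'] = 0
--     for i, s in enumerate(seq_lower):
--         if 'call' in s or 'bl ' in s:
--             for j in range(i+1, min(i+10, len(seq_lower))):
--                 if 'ret' in seq_lower[j]:
--                     feats['call_ret_pattern'] = 1
--                     break
--
--     # Nested memory access (double dereference)
--     feats['nested_mem'] = 1 if seq_text.count('[') > 1 else 0
--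
--     # MDS patterns (fill buffers, VERW)
--     feats['has_mds_pattern'] = 1 if any(x in seq_text for x in ['verw', 'mfence; lfence']) else 0
--
--     return feats
-- ===== SOURCE B (Python) =====
-- from typing import List, Dict
--
-- LOAD_KWS = ('ldr', 'mov', 'ld')
-- STORE_KWS = ('str', 'st', 'push')
-- BRANCH_KWS = ('j', 'b.', 'br', 'jmp', 'je', 'jne', 'jz', 'jnz')
-- CALL_KWS = ('call', 'bl ')
-- FENCE_KWS = ('lfence', 'mfence', 'sfence', 'dsb', 'dmb', 'isb')
-- STACK_KWS = ('push', 'pop', 'sp,', 'sp]', 'rbp', 'x29')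
-- ARITH_KWS = ('add', 'sub', 'mul', 'div', 'and', 'or', 'xor', 'shl', 'shr')
-- CMP_KWS = ('cmp', 'test', 'tst')
-- JB_KWS = ('j', 'b.')
-- MEM_KWS = ('ldr', 'mov', '[', 'ld')
--
--
-- def _has(s, kws):
--     return any(k in s for k in kws)
--
--
-- def extract_handcrafted_features(seq: List[str]) -> Dict[str, float]:
--     # Single back-to-front pass: counters plus bounded lookahead windows
--     # (mem-flags of the next 4 instructions, ret-flags of the next 9, branch-flag
--     # of the next one), so the pattern flags need no index loops or rescans.
--     lows = [s.lower() for s in seq]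
--     text = ' '.join(lows)
--
--     n_load = n_store = n_br = n_call = n_ret = n_fence = n_stack = n_arith = 0
--     cmp_br = mem_br = call_ret = 0
--     mem_win = []        # mem-flags of the up-to-4 following instructions
--     ret_win = []        # ret-flags of the up-to-9 following instructions
--     head_jb = False     # does the immediately following instruction branch?
--
--     for s in reversed(lows):
--         if _has(s, LOAD_KWS):
--             n_load += 1
--         if _has(s, STORE_KWS):
--             n_store += 1
--         if _has(s, BRANCH_KWS):
--             n_br += 1
--         if _has(s, CALL_KWS):
--             n_call += 1
--         if 'ret' in s:
--             n_ret += 1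
--         if _has(s, FENCE_KWS):
--             n_fence += 1
--         if _has(s, STACK_KWS):
--             n_stack += 1
--         if _has(s, ARITH_KWS):
--             n_arith += 1
--         if _has(s, CMP_KWS) and head_jb:
--             cmp_br = 1
--         if _has(s, JB_KWS) and any(mem_win):
--             mem_br = 1
--         if _has(s, CALL_KWS) and any(ret_win):
--             call_ret = 1
--         mem_win = [_has(s, MEM_KWS)] + mem_win[:3]
--         ret_win = ['ret' in s] + ret_win[:8]
--         head_jb = _has(s, JB_KWS)
--
--     return {
--         'num_instructions': len(seq),
--         'num_loads': n_load,
--         'num_stores': n_store,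
--         'num_branches': n_br,
--         'num_calls': n_call,
--         'num_rets': n_ret,
--         'num_fences': n_fence,
--         'has_compare_before_branch': cmp_br,
--         'mem_after_branch': mem_br,
--         'has_indirect_branch': 1 if _has(text, ('jmp *', 'call *', 'br x', 'blr x', 'ret')) else 0,
--         'has_cache_op': 1 if _has(text, ('clflush', 'clflushopt', 'dc civac', 'dc cvac')) else 0,
--         'has_timing': 1 if _has(text, ('rdtsc', 'rdtscp', 'cntvct')) else 0,
--         'stack_ops': n_stack,
--         'arith_ops': n_arith,
--         'call_ret_pattern': call_ret,
--         'nested_mem': 1 if text.count('[') > 1 else 0,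
--         'has_mds_pattern': 1 if _has(text, ('verw', 'mfence; lfence')) else 0,
--     }
-- ===== Notes on version B (the rewrite author's own statement) =====
-- stated objective: alternative
-- what changed: A's eight full keyword-count scans and three break-driven nested index/window loops are replaced by one back-to-front traversal that maintains bounded lookahead windows (mem-flags of the next 4 instructions, ret-flags of the next 9, branch-flag of the next 1) so all counters and all windowed pattern flags come out of a single pass with no slicing, no indices and no rescans.
import Mathlib
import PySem

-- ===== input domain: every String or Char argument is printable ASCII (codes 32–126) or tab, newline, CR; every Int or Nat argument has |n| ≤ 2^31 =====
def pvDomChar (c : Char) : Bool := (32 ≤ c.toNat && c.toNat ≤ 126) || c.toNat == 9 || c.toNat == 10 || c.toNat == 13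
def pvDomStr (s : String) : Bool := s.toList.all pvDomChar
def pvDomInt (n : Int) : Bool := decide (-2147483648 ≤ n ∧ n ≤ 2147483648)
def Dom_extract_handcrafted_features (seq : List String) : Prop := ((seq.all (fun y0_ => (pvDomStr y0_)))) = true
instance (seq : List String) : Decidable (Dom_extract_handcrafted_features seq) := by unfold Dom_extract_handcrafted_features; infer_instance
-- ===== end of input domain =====

-- B replaces A's eleven separate scans (eight keyword-count comprehensions plus three
-- break-driven nested index/window loops) by ONE back-to-front traversal carrying
-- bounded lookahead windows (objective: alternative decomposition, same asymptotics).

-- ===== PORT A =====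
def aAny (s : String) (kws : List String) : Bool := kws.any (fun x => PySem.Str.isIn x s)

def aCmpLoop (lows : List String) : List (Int × String) → Int
  | [] => 0
  | (i, s) :: rest =>
    if aAny s ["cmp", "test", "tst"] then
      if aAny (PySem.List.pyGetD lows (i + 1) "") ["j", "b."] then 1
      else aCmpLoop lows rest
    else aCmpLoop lows rest

def aMemInner (lows : List String) (i : Int) : Bool :=
  (PySem.List.pyRange (i + 1) (min (i + 5) (PySem.List.len lows)) 1).any
    (fun j => aAny (PySem.List.pyGetD lows j "") ["ldr", "mov", "[", "ld"])

def aMemLoop (lows : List String) : List (Int × String) → Int → Int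
  | [], flag => flag
  | (i, s) :: rest, flag =>
    aMemLoop lows rest
      (if aAny s ["j", "b."] then (if aMemInner lows i then 1 else flag) else flag)

def aCallInner (lows : List String) (i : Int) : Bool :=
  (PySem.List.pyRange (i + 1) (min (i + 10) (PySem.List.len lows)) 1).any
    (fun j => PySem.Str.isIn "ret" (PySem.List.pyGetD lows j ""))

def aCallLoop (lows : List String) : List (Int × String) → Int → Int
  | [], flag => flag
  | (i, s) :: rest, flag =>
    aCallLoop lows rest
      (if PySem.Str.isIn "call" s || PySem.Str.isIn "bl " s then
        (if aCallInner lows i then 1 else flag) else flag)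

def extract_handcrafted_features (seq : List String) : List (String × Int) :=
  let lows := seq.map PySem.Str.lower
  let text := PySem.Str.join " " lows
  [("num_instructions", PySem.List.len seq),
   ("num_loads", ((lows.filter (fun s => aAny s ["ldr", "mov", "ld"])).map (fun _ => (1 : Int))).sum),
   ("num_stores", ((lows.filter (fun s => aAny s ["str", "st", "push"])).map (fun _ => (1 : Int))).sum),
   ("num_branches", ((lows.filter (fun s => aAny s ["j", "b.", "br", "jmp", "je", "jne", "jz", "jnz"])).map (fun _ => (1 : Int))).sum),
   ("num_calls", ((lows.filter (fun s => aAny s ["call", "bl "])).map (fun _ => (1 : Int))).sum),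
   ("num_rets", ((lows.filter (fun s => PySem.Str.isIn "ret" s)).map (fun _ => (1 : Int))).sum),
   ("num_fences", ((lows.filter (fun s => aAny s ["lfence", "mfence", "sfence", "dsb", "dmb", "isb"])).map (fun _ => (1 : Int))).sum),
   ("has_compare_before_branch", aCmpLoop lows (PySem.List.enumerate (PySem.List.slice lows none (some (-1))) 0)),
   ("mem_after_branch", aMemLoop lows (PySem.List.enumerate (PySem.List.slice lows none (some (-1))) 0) 0),
   ("has_indirect_branch", if ["jmp *", "call *", "br x", "blr x", "ret"].any (fun x => PySem.Str.isIn x text) then 1 else 0),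
   ("has_cache_op", if ["clflush", "clflushopt", "dc civac", "dc cvac"].any (fun x => PySem.Str.isIn x text) then 1 else 0),
   ("has_timing", if ["rdtsc", "rdtscp", "cntvct"].any (fun x => PySem.Str.isIn x text) then 1 else 0),
   ("stack_ops", ((lows.filter (fun s => aAny s ["push", "pop", "sp,", "sp]", "rbp", "x29"])).map (fun _ => (1 : Int))).sum),
   ("arith_ops", ((lows.filter (fun s => aAny s ["add", "sub", "mul", "div", "and", "or", "xor", "shl", "shr"])).map (fun _ => (1 : Int))).sum),
   ("call_ret_pattern", aCallLoop lows (PySem.List.enumerate lows 0) 0),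
   ("nested_mem", if 1 < PySem.Str.count text "[" then 1 else 0),
   ("has_mds_pattern", if ["verw", "mfence; lfence"].any (fun x => PySem.Str.isIn x text) then 1 else 0)]

-- ===== PORT B =====
def bLOAD : List String := ["ldr", "mov", "ld"]
def bSTORE : List String := ["str", "st", "push"]
def bBRANCH : List String := ["j", "b.", "br", "jmp", "je", "jne", "jz", "jnz"]
def bCALL : List String := ["call", "bl "]
def bFENCE : List String := ["lfence", "mfence", "sfence", "dsb", "dmb", "isb"]
def bSTACK : List String := ["push", "pop", "sp,", "sp]", "rbp", "x29"]
def bARITH : List String := ["add", "sub", "mul", "div", "and", "or", "xor", "shl", "shr"]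
def bCMP : List String := ["cmp", "test", "tst"]
def bJB : List String := ["j", "b."]
def bMEM : List String := ["ldr", "mov", "[", "ld"]
def bIND : List String := ["jmp *", "call *", "br x", "blr x", "ret"]
def bCACHE : List String := ["clflush", "clflushopt", "dc civac", "dc cvac"]
def bTIME : List String := ["rdtsc", "rdtscp", "cntvct"]
def bMDS : List String := ["verw", "mfence; lfence"]

def bHas (s : String) (kws : List String) : Bool := kws.any (fun k => PySem.Str.isIn k s)

-- state of the single back-to-front pass: counters, 0/1 pattern flags, and the
-- bounded lookahead windows over the instructions that FOLLOW the current one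
structure BState where
  loads : Int
  stores : Int
  branches : Int
  calls : Int
  rets : Int
  fences : Int
  stackOps : Int
  arithOps : Int
  cmpBr : Int
  memBr : Int
  callRet : Int
  memWin : List Bool   -- mem-flags of the up-to-4 following instructions
  retWin : List Bool   -- ret-flags of the up-to-9 following instructions
  headJB : Bool        -- does the immediately following instruction branch?
deriving Repr, DecidableEq

def bStep (s : String) (st : BState) : BState :=
  { loads := if bHas s bLOAD then st.loads + 1 else st.loads,
    stores := if bHas s bSTORE then st.stores + 1 else st.stores,
    branches := if bHas s bBRANCH then st.branches + 1 else st.branches,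
    calls := if bHas s bCALL then st.calls + 1 else st.calls,
    rets := if PySem.Str.isIn "ret" s then st.rets + 1 else st.rets,
    fences := if bHas s bFENCE then st.fences + 1 else st.fences,
    stackOps := if bHas s bSTACK then st.stackOps + 1 else st.stackOps,
    arithOps := if bHas s bARITH then st.arithOps + 1 else st.arithOps,
    cmpBr := if bHas s bCMP && st.headJB then 1 else st.cmpBr,
    memBr := if bHas s bJB && st.memWin.any (fun b => b) then 1 else st.memBr,
    callRet := if bHas s bCALL && st.retWin.any (fun b => b) then 1 else st.callRet,
    memWin := bHas s bMEM :: st.memWin.take 3,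
    retWin := PySem.Str.isIn "ret" s :: st.retWin.take 8,
    headJB := bHas s bJB }

-- the reversed-iteration loop: process the suffix first, then the current element
def bRec : List String → BState
  | [] => ⟨0, 0, 0, 0, 0, 0, 0, 0, 0, 0, 0, [], [], false⟩
  | s :: rest => bStep s (bRec rest)

def extract_handcrafted_features_alt (seq : List String) : List (String × Int) :=
  let lows := seq.map PySem.Str.lower
  let text := PySem.Str.join " " lows
  let st := bRec lows
  [("num_instructions", PySem.List.len seq),
   ("num_loads", st.loads),
   ("num_stores", st.stores),
   ("num_branches", st.branches),
   ("num_calls", st.calls),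
   ("num_rets", st.rets),
   ("num_fences", st.fences),
   ("has_compare_before_branch", st.cmpBr),
   ("mem_after_branch", st.memBr),
   ("has_indirect_branch", if bHas text bIND then 1 else 0),
   ("has_cache_op", if bHas text bCACHE then 1 else 0),
   ("has_timing", if bHas text bTIME then 1 else 0),
   ("stack_ops", st.stackOps),
   ("arith_ops", st.arithOps),
   ("call_ret_pattern", st.callRet),
   ("nested_mem", if 1 < PySem.Str.count text "[" then 1 else 0),
   ("has_mds_pattern", if bHas text bMDS then 1 else 0)]

-- ===== PRECONDITION & SPEC =====
def Spec_extract_handcrafted_features (seq : List String) (out : List (String × Int)) : Prop := out = extract_handcrafted_features_alt seq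
instance (seq : List String) (out : List (String × Int)) : Decidable (Spec_extract_handcrafted_features seq out) := by unfold Spec_extract_handcrafted_features; infer_instance

-- ===== CLAIM (what is proved, stated in full; the proofs are below) =====
def Claim_equal_extract_handcrafted_features : Prop := ∀ (seq : List String), Dom_extract_handcrafted_features seq → Spec_extract_handcrafted_features seq (extract_handcrafted_features seq)

-- ===== LEMMAS AND PROOFS =====

-- shared specifications of the three pattern flags, stated on suffixes
def headJBspec : List String → Bool
  | [] => false
  | s :: _ => bHas s bJB

def cmpSpec : List String → Bool
  | [] => false
  | s :: t => (bHas s bCMP && headJBspec t) || cmpSpec t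

def memSpec : List String → Bool
  | [] => false
  | s :: t => (bHas s bJB && (t.take 4).any (fun x => bHas x bMEM)) || memSpec t

def callSpec : List String → Bool
  | [] => false
  | s :: t => (bHas s bCALL && (t.take 9).any (fun x => PySem.Str.isIn "ret" x)) || callSpec t

theorem count_sum_eq (l : List String) (p : String → Bool) :
    ((l.filter p).map (fun _ => (1 : Int))).sum = (l.countP p : Int) := by
  induction l with
  | nil => simp
  | cons a t ih =>
    by_cases h : p a <;> simp [List.countP_eq_length_filter, h]; omega

theorem any_pyRange_getD {α : Type} (l : List α) (d : α) (p : α → Bool) :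
    ∀ (n : Nat) (a b : Int), (b - a).toNat = n → 0 ≤ a → b ≤ l.length →
      (PySem.List.pyRange a b 1).any (fun j => p (PySem.List.pyGetD l j d)) =
      ((l.drop a.toNat).take n).any p := by
  intro n
  induction n with
  | zero =>
    intro a b hn ha hb
    rw [PySem.List.pyRange_one_eq_nil (by omega)]
    simp
  | succ m ih =>
    intro a b hn ha hb
    have hab : a < b := by omega
    have hlt : a.toNat < l.length := by omega
    rw [PySem.List.pyRange_one_cons hab, List.any_cons]
    have hget : PySem.List.pyGetD l a d = l[a.toNat] := by
      rw [PySem.List.pyGetD_of_nonneg]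
      · exact List.getD_eq_getElem l d hlt
      · exact ha
    have hdrop : l.drop a.toNat = l[a.toNat] :: l.drop (a.toNat + 1) :=
      (List.getElem_cons_drop hlt).symm
    have hrec := ih (a + 1) b (by omega) (by omega) hb
    have htn : (a + 1).toNat = a.toNat + 1 := by omega
    rw [hrec, htn, hdrop, List.take_succ_cons, List.any_cons, hget]

theorem aMemInner_eq (l : List String) (k : Nat) :
    aMemInner l (k : Int) = ((l.drop (k + 1)).take 4).any (fun s => aAny s ["ldr", "mov", "[", "ld"]) := by
  unfold aMemInner
  by_cases h : (k : Int) + 5 ≤ (l.length : Int)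
  · have hmin : min ((k : Int) + 5) (PySem.List.len l) = (k : Int) + 5 := by
      simp [PySem.List.len]; omega
    rw [hmin, any_pyRange_getD l "" (fun s => aAny s ["ldr", "mov", "[", "ld"]) 4 ((k : Int) + 1) ((k : Int) + 5) (by omega) (by omega) (by simpa using h)]
    norm_num
  · have hmin : min ((k : Int) + 5) (PySem.List.len l) = (l.length : Int) := by
      simp [PySem.List.len]; omega
    rw [hmin, any_pyRange_getD l "" (fun s => aAny s ["ldr", "mov", "[", "ld"]) (l.length - (k + 1)) ((k : Int) + 1) (l.length : Int) (by omega) (by omega) (by omega)]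
    have h1 : ((l.drop (k + 1)).take (l.length - (k + 1))) = l.drop (k + 1) := by
      apply List.take_of_length_le; simp
    have h2 : ((l.drop (k + 1)).take 4) = l.drop (k + 1) := by
      apply List.take_of_length_le; simp; omega
    have h3 : ((k : Int) + 1).toNat = k + 1 := by omega
    rw [h3, h1, h2]

theorem aCallInner_eq (l : List String) (k : Nat) :
    aCallInner l (k : Int) = ((l.drop (k + 1)).take 9).any (fun s => PySem.Str.isIn "ret" s) := by
  unfold aCallInner
  by_cases h : (k : Int) + 10 ≤ (l.length : Int)
  · have hmin : min ((k : Int) + 10) (PySem.List.len l) = (k : Int) + 10 := by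
      simp [PySem.List.len]; omega
    rw [hmin, any_pyRange_getD l "" (fun s => PySem.Str.isIn "ret" s) 9 ((k : Int) + 1) ((k : Int) + 10) (by omega) (by omega) (by simpa using h)]
    norm_num
  · have hmin : min ((k : Int) + 10) (PySem.List.len l) = (l.length : Int) := by
      simp [PySem.List.len]; omega
    rw [hmin, any_pyRange_getD l "" (fun s => PySem.Str.isIn "ret" s) (l.length - (k + 1)) ((k : Int) + 1) (l.length : Int) (by omega) (by omega) (by omega)]
    have h1 : ((l.drop (k + 1)).take (l.length - (k + 1))) = l.drop (k + 1) := by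
      apply List.take_of_length_le; simp
    have h2 : ((l.drop (k + 1)).take 9) = l.drop (k + 1) := by
      apply List.take_of_length_le; simp; omega
    have h3 : ((k : Int) + 1).toNat = k + 1 := by omega
    rw [h3, h1, h2]

theorem step_if2 (A B Z : Bool) :
    (if A then (if B then (1 : Int) else (if Z then 1 else 0)) else (if Z then 1 else 0)) =
      (if (A && B || Z) then (1 : Int) else 0) := by
  cases A <;> cases B <;> cases Z <;> simp

theorem step_if (P Q : Bool) (f : Int) :
    (if P then (if Q then (1 : Int) else f) else f) = (if P && Q then (1 : Int) else f) := by
  cases P <;> cases Q <;> simp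

theorem if_or (P Q : Bool) (f : Int) :
    (if Q then (1 : Int) else (if P then 1 else f)) = (if (P || Q) then (1 : Int) else f) := by
  cases P <;> cases Q <;> simp

theorem if_or2 (P Q : Bool) :
    (if P then (1 : Int) else (if Q then 1 else 0)) = (if (P || Q) then (1 : Int) else 0) := by
  cases P <;> cases Q <;> simp

theorem getD_at (l : List String) (k : Nat) (hk : k < l.length) :
    PySem.List.pyGetD l ((k : Int)) "" = l[k] := by
  rw [PySem.List.pyGetD_of_nonneg]
  · simpa using List.getD_eq_getElem l "" (by simpa using hk)
  · omega

theorem cmpAux (l : List String) :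
    ∀ (fuel k : Nat), l.length - k = fuel → k ≤ l.length →
      aCmpLoop l (PySem.List.enumerate ((l.drop k).dropLast) (k : Int)) =
        (if cmpSpec (l.drop k) then 1 else 0) := by
  intro fuel
  induction fuel with
  | zero =>
    intro k hf hk
    have h0 : l.drop k = [] := List.drop_eq_nil_of_le (by omega)
    simp [h0, aCmpLoop, cmpSpec, PySem.List.enumerate_nil]
  | succ n ih =>
    intro k hf hk
    have hklt : k < l.length := by omega
    have hdrop : l.drop k = l[k] :: l.drop (k + 1) := (List.getElem_cons_drop hklt).symm
    rw [hdrop]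
    cases hdl : l.drop (k + 1) with
    | nil =>
      simp [List.dropLast_singleton, PySem.List.enumerate_nil, aCmpLoop, cmpSpec, headJBspec]
    | cons y t =>
      have hlen : k + 1 < l.length := by
        have := congrArg List.length hdl; simp at this; omega
      have hy : l[k + 1] = y := by
        have h2 : l.drop (k + 1) = l[k + 1] :: l.drop (k + 2) := (List.getElem_cons_drop hlen).symm
        rw [hdl] at h2; exact (List.cons.injEq _ _ _ _ ▸ h2).1.symm
      have hcast : (k : Int) + 1 = ((k + 1 : Nat) : Int) := by push_cast; ring
      rw [List.dropLast_cons₂, PySem.List.enumerate_cons, aCmpLoop, hcast,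
          getD_at l (k + 1) hlen, hy]
      have hrec := ih (k + 1) (by omega) (by omega)
      rw [hdl] at hrec
      rw [hrec, step_if2]
      simp [cmpSpec, headJBspec, aAny, bHas, bCMP, bJB]

theorem memAux (l : List String) :
    ∀ (fuel k : Nat) (f : Int), l.length - k = fuel → k ≤ l.length →
      aMemLoop l (PySem.List.enumerate ((l.drop k).dropLast) (k : Int)) f =
        (if memSpec (l.drop k) then 1 else f) := by
  intro fuel
  induction fuel with
  | zero =>
    intro k f hf hk
    have h0 : l.drop k = [] := List.drop_eq_nil_of_le (by omega)
    simp [h0, aMemLoop, memSpec, PySem.List.enumerate_nil]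
  | succ n ih =>
    intro k f hf hk
    have hklt : k < l.length := by omega
    have hdrop : l.drop k = l[k] :: l.drop (k + 1) := (List.getElem_cons_drop hklt).symm
    rw [hdrop]
    cases hdl : l.drop (k + 1) with
    | nil =>
      simp [List.dropLast_singleton, PySem.List.enumerate_nil, aMemLoop, memSpec]
    | cons y t =>
      have hcast : (k : Int) + 1 = ((k + 1 : Nat) : Int) := by push_cast; ring
      have hrec := ih (k + 1) (if aAny l[k] ["j", "b."] && ((l.drop (k + 1)).take 4).any (fun s => aAny s ["ldr", "mov", "[", "ld"]) then 1 else f) (by omega) (by omega)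
      rw [hdl] at hrec
      rw [List.dropLast_cons₂, PySem.List.enumerate_cons, aMemLoop, step_if, aMemInner_eq, hdl, hcast, hrec, if_or]
      simp only [memSpec, aAny, bHas, bJB, bMEM]
      rfl

theorem callAux (l : List String) :
    ∀ (fuel k : Nat) (f : Int), l.length - k = fuel → k ≤ l.length →
      aCallLoop l (PySem.List.enumerate (l.drop k) (k : Int)) f =
        (if callSpec (l.drop k) then 1 else f) := by
  intro fuel
  induction fuel with
  | zero =>
    intro k f hf hk
    have h0 : l.drop k = [] := List.drop_eq_nil_of_le (by omega)
    simp [h0, aCallLoop, callSpec, PySem.List.enumerate_nil]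
  | succ n ih =>
    intro k f hf hk
    have hklt : k < l.length := by omega
    have hdrop : l.drop k = l[k] :: l.drop (k + 1) := (List.getElem_cons_drop hklt).symm
    rw [hdrop, PySem.List.enumerate_cons, aCallLoop, step_if, aCallInner_eq]
    have hrec := ih (k + 1) (if (PySem.Str.isIn "call" l[k] || PySem.Str.isIn "bl " l[k]) && ((l.drop (k + 1)).take 9).any (fun s => PySem.Str.isIn "ret" s) then 1 else f) (by omega) (by omega)
    have hcast : (k : Int) + 1 = ((k + 1 : Nat) : Int) := by push_cast; ring
    rw [hcast, hrec, if_or]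
    simp only [callSpec, bHas, bCALL, List.any_cons, List.any_nil, Bool.or_false]

theorem any_map_id {α : Type} (p : α → Bool) (l : List α) :
    (l.map p).any (fun b => b) = l.any p := by
  induction l with
  | nil => rfl
  | cons a u ih => simp [ih]

theorem bRec_spec (l : List String) :
    bRec l =
      { loads := (l.countP (fun s => bHas s bLOAD) : Int),
        stores := (l.countP (fun s => bHas s bSTORE) : Int),
        branches := (l.countP (fun s => bHas s bBRANCH) : Int),
        calls := (l.countP (fun s => bHas s bCALL) : Int),
        rets := (l.countP (fun s => PySem.Str.isIn "ret" s) : Int),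
        fences := (l.countP (fun s => bHas s bFENCE) : Int),
        stackOps := (l.countP (fun s => bHas s bSTACK) : Int),
        arithOps := (l.countP (fun s => bHas s bARITH) : Int),
        cmpBr := if cmpSpec l then 1 else 0,
        memBr := if memSpec l then 1 else 0,
        callRet := if callSpec l then 1 else 0,
        memWin := (l.take 4).map (fun s => bHas s bMEM),
        retWin := (l.take 9).map (fun s => PySem.Str.isIn "ret" s),
        headJB := headJBspec l } := by
  induction l with
  | nil => simp [bRec, cmpSpec, memSpec, callSpec, headJBspec]
  | cons s t ih =>
    rw [bRec, ih]
    simp only [bStep, BState.mk.injEq]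
    refine ⟨?_, ?_, ?_, ?_, ?_, ?_, ?_, ?_, ?_, ?_, ?_, ?_, ?_, ?_⟩
    · rw [List.countP_cons]; split_ifs <;> push_cast <;> ring
    · rw [List.countP_cons]; split_ifs <;> push_cast <;> ring
    · rw [List.countP_cons]; split_ifs <;> push_cast <;> ring
    · rw [List.countP_cons]; split_ifs <;> push_cast <;> ring
    · rw [List.countP_cons]; split_ifs <;> push_cast <;> ring
    · rw [List.countP_cons]; split_ifs <;> push_cast <;> ring
    · rw [List.countP_cons]; split_ifs <;> push_cast <;> ring
    · rw [List.countP_cons]; split_ifs <;> push_cast <;> ring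
    · rw [if_or2]; simp only [cmpSpec]; rfl
    · rw [any_map_id, if_or2]; simp only [memSpec]; rfl
    · rw [any_map_id, if_or2]; simp only [callSpec]; rfl
    · simp [List.take_take]
    · simp [List.take_take]
    · rfl

theorem extract_handcrafted_features_spec : Claim_equal_extract_handcrafted_features := by
  intro seq _
  show extract_handcrafted_features seq = extract_handcrafted_features_alt seq
  unfold extract_handcrafted_features extract_handcrafted_features_alt
  have hcmp := cmpAux (seq.map PySem.Str.lower) (seq.map PySem.Str.lower).length 0 (by omega) (by omega)
  have hmem := memAux (seq.map PySem.Str.lower) (seq.map PySem.Str.lower).length 0 0 (by omega) (by omega)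
  have hcall := callAux (seq.map PySem.Str.lower) (seq.map PySem.Str.lower).length 0 0 (by omega) (by omega)
  simp only [List.drop_zero, Nat.cast_zero] at hcmp hmem hcall
  simp only [PySem.List.slice_to_neg_one,
             count_sum_eq, bRec_spec, hcmp, hmem, hcall,
             aAny, bHas, bLOAD, bSTORE, bBRANCH, bCALL, bFENCE, bSTACK, bARITH,
             bIND, bCACHE, bTIME, bMDS]
  rfl
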